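-- pv_equiv track=rewrite | github.com/alexhong2020/CS-Independent-Study | CS101/Replit/PopularCategory.py | popular
-- ===== SOURCE A (Python) =====
-- def popular(words, categories):
--     word_list = words.split()
--     category_list = categories.split()
--     category_words = {}
--
--     for word, category in zip(word_list, category_list):
--         if category not in category_words:
--             category_words[category] = []
--         category_words[category].append(word)
--
--     max_count = max(len(words) for words in category_words.values())
--     max_categories = [category for category, words in category_words.items() if len(words) == max_count]
--     max_categories.sort()
--
--     return ' '.join(sorted(category_words[max_categories[0]]))
-- ===== SOURCE B (Python) =====
-- def popular(words, categories):
--     pairs = list(zip(words.split(), categories.split()))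
--     cats = sorted({c for _, c in pairs})
--     best = max(cats, key=lambda c: len([w for w, cc in pairs if cc == c]))
--     return ' '.join(sorted([w for w, cc in pairs if cc == best]))
-- ===== Notes on version B (the rewrite author's own statement) =====
-- stated objective: alternative
-- what changed: Replaced dict-based grouping plus a separate max-count/filter/sort-tiebreak phase by a single max-with-key scan over the sorted set of categories (first maximum in alphabetical order wins ties), with per-category counts read off the zipped pair list.
import Mathlib
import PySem

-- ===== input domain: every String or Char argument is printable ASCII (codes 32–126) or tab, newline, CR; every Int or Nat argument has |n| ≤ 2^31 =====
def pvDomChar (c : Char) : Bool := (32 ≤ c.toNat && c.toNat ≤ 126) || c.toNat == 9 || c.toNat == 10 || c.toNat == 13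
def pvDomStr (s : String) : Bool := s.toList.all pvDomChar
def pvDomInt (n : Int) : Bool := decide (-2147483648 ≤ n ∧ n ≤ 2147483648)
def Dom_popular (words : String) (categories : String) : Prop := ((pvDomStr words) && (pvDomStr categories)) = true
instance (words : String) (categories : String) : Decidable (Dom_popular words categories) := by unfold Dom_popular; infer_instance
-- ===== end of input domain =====

-- B replaces A's dict grouping + separate max/filter/sort tie-break by one max-with-key scan
-- over the sorted category set (objective: alternative decomposition, similar cost).

-- ===== PORT A =====
def popular (words : String) (categories : String) : String :=
  let wordList := PySem.Str.split₀ words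
  let categoryList := PySem.Str.split₀ categories
  let categoryWords := (wordList.zip categoryList).foldl
    (fun (d : PySem.Dict String (List String)) (p : String × String) =>
      let d' := if d.contains p.2 then d else d.insert p.2 ([] : List String)
      d'.modify p.2 [] (fun ws => ws ++ [p.1]))
    PySem.Dict.empty
  -- max(...) raises ValueError on an empty dict: none-branch excluded by Pre_popular
  match PySem.List.max? (categoryWords.values.map (fun ws => (ws.length : Int))) (fun x => x) with
  | none => ""
  | some maxCount =>
    let maxCategories :=
      (categoryWords.items.filter (fun p => (p.2.length : Int) == maxCount)).map (fun p => p.1)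
    -- max_categories[0]: the [] branch is unreachable (max_count is attained)
    match PySem.List.sorted maxCategories (fun c => c) with
    | [] => ""
    | c :: _ => PySem.Str.join " " (PySem.List.sorted (categoryWords.getD c []) (fun w => w))

-- ===== PORT B =====
def popular_alt (words : String) (categories : String) : String :=
  let pairs := (PySem.Str.split₀ words).zip (PySem.Str.split₀ categories)
  let cats := PySem.List.sorted (PySem.Set.ofList (pairs.map (fun p => p.2))) (fun c => c)
  -- max(...) raises ValueError on an empty category list: none-branch excluded by Pre_popular
  match PySem.List.max? cats
      (fun c => (((pairs.filter (fun p => p.2 == c)).map (fun p => p.1)).length : Int)) with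
  | none => ""
  | some best =>
    PySem.Str.join " " (PySem.List.sorted ((pairs.filter (fun p => p.2 == best)).map (fun p => p.1)) (fun w => w))

-- ===== PRECONDITION & SPEC =====
-- Pre_ excludes exactly the inputs on which Python A raises ValueError (max() of an empty
-- sequence): those where either string has no words, so the zipped pair list is empty.
def Pre_popular (words : String) (categories : String) : Prop :=
  PySem.Str.split₀ words ≠ [] ∧ PySem.Str.split₀ categories ≠ []
instance (words : String) (categories : String) : Decidable (Pre_popular words categories) := by
  unfold Pre_popular; infer_instance
def pvWitness_popular : String × String := ("a b", "x y")

def Spec_popular (words : String) (categories : String) (out : String) : Prop := out = popular_alt words categories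
instance (words : String) (categories : String) (out : String) : Decidable (Spec_popular words categories out) := by unfold Spec_popular; infer_instance

-- ===== CLAIM (what is proved, stated in full; the proofs are below) =====
def Claim_equal_popular : Prop := ∀ (words : String) (categories : String), Dom_popular words categories → Pre_popular words categories → Spec_popular words categories (popular words categories)

-- ===== LEMMAS AND PROOFS =====

-- A's loop body ('if cat not in d: d[cat] = []' then append) is one dict modify.
lemma pv_step_eq (d : PySem.Dict String (List String)) (p : String × String) :
    (let d' := if d.contains p.2 then d else d.insert p.2 ([] : List String)
     d'.modify p.2 [] (fun ws => ws ++ [p.1])) = d.modify p.2 [] (fun ws => ws ++ [p.1]) := by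
  by_cases h : d.contains p.2
  · simp [h]
  · have h' : d.contains p.2 = false := by simpa using h
    simp [h', PySem.Dict.modify, PySem.Dict.getD_insert_self,
      PySem.Dict.insert_insert_self, PySem.Dict.getD_of_not_contains d ([] : List String) h']

lemma pv_dict_getD (ps : List (String × String)) (c : String) :
    (ps.foldl (fun d p => d.modify p.2 [] (fun ws => ws ++ [p.1]))
        (PySem.Dict.empty : PySem.Dict String (List String))).getD c []
      = (ps.filter (fun p => p.2 == c)).map (fun p => p.1) := by
  have h := PySem.Dict.getD_foldl_modify_append (ps.map (fun p => (p.2, p.1)))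
    (PySem.Dict.empty : PySem.Dict String (List String)) c
  rw [List.foldl_map] at h
  simpa [List.filter_map, Function.comp, List.map_map, PySem.Dict.getD_empty] using h

lemma pv_dict_keys (ps : List (String × String)) :
    (ps.foldl (fun d p => d.modify p.2 [] (fun ws => ws ++ [p.1]))
        (PySem.Dict.empty : PySem.Dict String (List String))).keys
      = PySem.Set.ofList (ps.map (fun p => p.2)) := by
  have h := PySem.Dict.keys_foldl_modify_key ps (fun p => p.2) ([] : List String)
    (fun _ p => fun ws => ws ++ [p.1]) (PySem.Dict.empty : PySem.Dict String (List String))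
  simpa [PySem.Set.update, PySem.Set.ofList_eq_foldl, PySem.Dict.keys_empty] using h

lemma pv_dict_nodup (ps : List (String × String)) :
    (ps.foldl (fun d p => d.modify p.2 [] (fun ws => ws ++ [p.1]))
        (PySem.Dict.empty : PySem.Dict String (List String))).keys.Nodup := by
  have h := PySem.Dict.nodup_keys_foldl_modify_key ps (fun p => p.2) ([] : List String)
    (fun _ p => fun ws => ws ++ [p.1]) (PySem.Dict.empty : PySem.Dict String (List String))
    (by simp [PySem.Dict.keys_empty])
  simpa using h

-- Invariant of Python max(..., key=f)'s left fold over a strictly increasing tail.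
lemma pv_max_go (f : String → Int) :
    ∀ (l : List String) (b : String),
      (∀ y ∈ l, b < y) → l.Pairwise (· < ·) →
      ∃ c, PySem.List.max? (b :: l) f = some c
        ∧ (c = b ∨ c ∈ l) ∧ f b ≤ f c ∧ (∀ y ∈ l, f y ≤ f c)
        ∧ (f c = f b → c = b) ∧ (∀ y ∈ l, f y = f c → c ≤ y) := by
  intro l
  induction l with
  | nil =>
    intro b _ _
    exact ⟨b, rfl, Or.inl rfl, le_refl _, by simp, fun _ => rfl, by simp⟩
  | cons x t ih =>
    intro b hb hp
    have hxt : ∀ y ∈ t, x < y := (List.pairwise_cons.mp hp).1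
    have hpt : t.Pairwise (· < ·) := (List.pairwise_cons.mp hp).2
    have hbx : b < x := hb x (by simp)
    have key : PySem.List.max? (b :: x :: t) f
        = PySem.List.max? ((if f b < f x then x else b) :: t) f := by
      by_cases hfx : f b < f x <;> simp [PySem.List.max?, hfx]
    by_cases hfx : f b < f x
    · obtain ⟨c, hc, hmem, hle, hall, htie, hfirst⟩ := ih x hxt hpt
      refine ⟨c, by rw [key, if_pos hfx]; exact hc, ?_, ?_, ?_, ?_, ?_⟩
      · rcases hmem with h | h
        · exact Or.inr (h ▸ List.mem_cons_self)
        · exact Or.inr (List.mem_cons_of_mem _ h)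
      · exact le_of_lt (lt_of_lt_of_le hfx hle)
      · intro y hy
        rcases List.mem_cons.mp hy with h | h
        · exact h ▸ hle
        · exact hall y h
      · intro h
        exact absurd (lt_of_lt_of_le hfx hle) (by omega)
      · intro y hy hEq
        rcases List.mem_cons.mp hy with h | h
        · subst h
          exact le_of_eq (htie (by omega))
        · exact hfirst y h hEq
    · have hxb : f x ≤ f b := not_lt.mp hfx
      obtain ⟨c, hc, hmem, hle, hall, htie, hfirst⟩ :=
        ih b (fun y hy => hb y (List.mem_cons_of_mem _ hy)) hpt
      refine ⟨c, by rw [key, if_neg hfx]; exact hc, ?_, hle, ?_, htie, ?_⟩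
      · rcases hmem with h | h
        · exact Or.inl h
        · exact Or.inr (List.mem_cons_of_mem _ h)
      · intro y hy
        rcases List.mem_cons.mp hy with h | h
        · exact h ▸ le_trans hxb hle
        · exact hall y h
      · intro y hy hEq
        rcases List.mem_cons.mp hy with h | h
        · subst h
          have hcb : c = b := htie (by omega)
          exact le_of_lt (hcb ▸ hbx)
        · exact hfirst y h hEq

-- Python max picks the FIRST maximum; over a strictly increasing list that is the least tie.
lemma pv_max_first (f : String → Int) (l : List String) (hp : l.Pairwise (· < ·)) (c : String)
    (h : PySem.List.max? l f = some c) : ∀ y ∈ l, f y = f c → c ≤ y := by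
  cases l with
  | nil => simp [PySem.List.max?] at h
  | cons x t =>
    have hxt : ∀ y ∈ t, x < y := (List.pairwise_cons.mp hp).1
    obtain ⟨c', hc', _, hle, _, htie, hfirst⟩ := pv_max_go f t x hxt (List.pairwise_cons.mp hp).2
    have hcc : c = c' := Option.some.inj (h ▸ hc')
    subst hcc
    intro y hy hEq
    rcases List.mem_cons.mp hy with hyx | hyt
    · subst hyx
      exact le_of_eq (htie (by omega))
    · exact hfirst y hyt hEq

lemma pv_argmax_unique (f : String → Int) (l : List String) (r1 r2 : String)
    (m1 : r1 ∈ l) (u1 : ∀ y ∈ l, f y ≤ f r1) (t1 : ∀ y ∈ l, f y = f r1 → r1 ≤ y)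
    (m2 : r2 ∈ l) (u2 : ∀ y ∈ l, f y ≤ f r2) (t2 : ∀ y ∈ l, f y = f r2 → r2 ≤ y) :
    r1 = r2 := by
  have hf : f r1 = f r2 := le_antisymm (u2 r1 m1) (u1 r2 m2)
  exact le_antisymm (t1 r2 m2 hf.symm) (t2 r1 m1 hf)

-- A's loop lambda, with the 'setdefault' conditional eliminated.
lemma pv_step_eq' :
    (fun (d : PySem.Dict String (List String)) (p : String × String) =>
      (if d.contains p.2 then d else d.insert p.2 ([] : List String)).modify p.2 []
        (fun ws => ws ++ [p.1]))
    = fun (d : PySem.Dict String (List String)) (p : String × String) =>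
        d.modify p.2 [] (fun ws => ws ++ [p.1]) :=
  funext fun d => funext fun p => pv_step_eq d p

-- ===== VERDICT (by name: the statement is the Claim_ definition above) =====
theorem popular_spec : Claim_equal_popular := by
  intro words categories _ hpre
  obtain ⟨hw, hc⟩ := hpre
  simp only [Spec_popular, popular, popular_alt]
  rw [pv_step_eq']
  set ps := (PySem.Str.split₀ words).zip (PySem.Str.split₀ categories) with hps
  set d := ps.foldl (fun d p => d.modify p.2 [] (fun ws => ws ++ [p.1])) PySem.Dict.empty with hd
  set K := PySem.Set.ofList (ps.map (fun p => p.2)) with hK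
  set f := fun c => (((ps.filter (fun p => p.2 == c)).map (fun p => p.1)).length : Int) with hf
  -- dict characterization
  have hgetD : ∀ c, d.getD c [] = (ps.filter (fun p => p.2 == c)).map (fun p => p.1) := by
    intro c; rw [hd]; exact pv_dict_getD ps c
  have hnd : d.keys.Nodup := by rw [hd]; exact pv_dict_nodup ps
  have hkeys : d.keys = K := by rw [hd, hK]; exact pv_dict_keys ps
  have hitems : d.items
      = K.map (fun c => (c, (ps.filter (fun p => p.2 == c)).map (fun p => p.1))) := by
    rw [PySem.Dict.items_eq_map_keys d hnd ([] : List String), hkeys]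
    exact List.map_congr_left (fun c _ => by rw [hgetD c])
  have hvalues : d.values
      = K.map (fun c => (ps.filter (fun p => p.2 == c)).map (fun p => p.1)) := by
    rw [PySem.Dict.values_eq_map_keys d hnd ([] : List String), hkeys]
    exact List.map_congr_left (fun c _ => by rw [hgetD c])
  have hAarg : d.values.map (fun ws => (ws.length : Int)) = K.map f := by
    rw [hvalues, List.map_map]; rfl
  -- nonemptiness
  obtain ⟨w0, wt, hw'⟩ : ∃ a l, PySem.Str.split₀ words = a :: l := by
    cases hww : PySem.Str.split₀ words with
    | nil => exact absurd hww hw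
    | cons a l => exact ⟨a, l, rfl⟩
  obtain ⟨c0, ct, hc'⟩ : ∃ a l, PySem.Str.split₀ categories = a :: l := by
    cases hcc : PySem.Str.split₀ categories with
    | nil => exact absurd hcc hc
    | cons a l => exact ⟨a, l, rfl⟩
  have hps' : ps = (w0, c0) :: wt.zip ct := by rw [hps, hw', hc']; rfl
  have hc0K : c0 ∈ K := by
    rw [hK]
    exact (PySem.Set.mem_ofList _ _).mpr (by rw [hps']; exact List.mem_map_of_mem List.mem_cons_self)
  have hKne : K ≠ [] := fun h => by rw [h] at hc0K; exact List.not_mem_nil hc0K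
  split
  · -- A's max() scrutinee is none: impossible, the dict is nonempty
    next hmaxA =>
    rw [hAarg] at hmaxA
    have : K.map f = [] := (PySem.List.max?_eq_none_iff _ _).mp hmaxA
    exact absurd (List.map_eq_nil_iff.mp this) hKne
  next m hmaxA =>
    have hmaxA' : PySem.List.max? (K.map f) (fun x => x) = some m := by rw [← hAarg]; exact hmaxA
    have hm_mem : m ∈ K.map f := PySem.List.max?_mem hmaxA'
    have hm_max : ∀ z ∈ K.map f, z ≤ m := PySem.List.max?_isMax hmaxA'
    obtain ⟨cm, hcmK, hcmf⟩ := List.mem_map.mp hm_mem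
    have hmc : (d.items.filter (fun p => (p.2.length : Int) == m)).map (fun p => p.1)
        = K.filter (fun c => f c == m) := by
      rw [hitems, List.filter_map, List.map_map]
      show List.map (fun c : String => c) _ = _
      rw [List.map_id']
      rfl
    have hLK : ∀ y, y ∈ PySem.List.sorted K (fun c : String => c) ↔ y ∈ K :=
      fun y => PySem.List.mem_sorted K _ false y
    split
    · -- sorted(max_categories) = []: impossible, max_count is attained at cm
      next hS =>
      rw [hmc] at hS
      have hnil : K.filter (fun c => f c == m) = [] := (PySem.List.sorted_eq_nil_iff _ _ _).mp hS
      have hcm : cm ∈ K.filter (fun c => f c == m) :=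
        List.mem_filter.mpr ⟨hcmK, by rw [beq_iff_eq, hcmf]⟩
      rw [hnil] at hcm
      exact absurd hcm List.not_mem_nil
    next cA rest hS =>
      rw [hmc] at hS
      split
      · -- B's max() scrutinee is none: impossible, the category set is nonempty
        next hmaxB =>
        have : PySem.List.sorted K (fun c => c) = [] := (PySem.List.max?_eq_none_iff _ _).mp hmaxB
        exact absurd ((PySem.List.sorted_eq_nil_iff _ _ _).mp this) hKne
      next best hmaxB =>
        have hcA_filter : cA ∈ K.filter (fun c => f c == m) := by
          have : cA ∈ PySem.List.sorted (K.filter (fun c => f c == m)) (fun c => c) :=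
            hS ▸ List.mem_cons_self
          exact (PySem.List.mem_sorted _ _ _ _).mp this
        have hcA_K : cA ∈ K := (List.mem_filter.mp hcA_filter).1
        have hcA_f : f cA = m := beq_iff_eq.mp (List.mem_filter.mp hcA_filter).2
        have u1 : ∀ y ∈ K, f y ≤ f cA := by
          intro y hy; rw [hcA_f]; exact hm_max (f y) (List.mem_map_of_mem hy)
        have t1 : ∀ y ∈ K, f y = f cA → cA ≤ y := by
          intro y hy hEq
          exact PySem.List.key_head_sorted_le _ (fun c => c) hS y
            (List.mem_filter.mpr ⟨hy, by rw [beq_iff_eq, hEq, hcA_f]⟩)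
        have m2 : best ∈ K := (hLK best).mp (PySem.List.max?_mem hmaxB)
        have u2 : ∀ y ∈ K, f y ≤ f best :=
          fun y hy => PySem.List.max?_isMax hmaxB y ((hLK y).mpr hy)
        have t2 : ∀ y ∈ K, f y = f best → best ≤ y := by
          intro y hy hEq
          have hp : (PySem.List.sorted K (fun c : String => c)).Pairwise (· < ·) := by
            rw [hK]; exact PySem.List.sorted_ofList_pairwise_lt _
          exact pv_max_first f _ hp best hmaxB y ((hLK y).mpr hy) hEq
        have hfinal : cA = best := pv_argmax_unique f K cA best hcA_K u1 t1 m2 u2 t2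
        rw [hgetD cA, hfinal]
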